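-- pv_equiv track=rewrite | github.com/thamolwanpo/SEEK-Policy | scripts/4_generate_role_agents_summary.py | build_domain_feature_indices
-- ===== SOURCE A (Python) =====
-- def build_domain_feature_indices(
--     feature_columns: list[str],
--     table_key_domain_map: dict[str, str],
-- ) -> dict[str, list[int]]:
--     domain_to_indices = {
--         "climate_data": [],
--         "socio_economics_data": [],
--         "other_data": [],
--     }
--
--     for index, column in enumerate(feature_columns):
--         if "__" not in column:
--             continue
--         table_key = column.split("__", 1)[0]
--         domain = table_key_domain_map.get(table_key, "")
--         if domain in domain_to_indices:
--             domain_to_indices[domain].append(index)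
--
--     return domain_to_indices
-- ===== SOURCE B (Python) =====
-- def build_domain_feature_indices(
--     feature_columns: list[str],
--     table_key_domain_map: dict[str, str],
-- ) -> dict[str, list[int]]:
--     return {
--         domain: [
--             index
--             for index, column in enumerate(feature_columns)
--             if "__" in column
--             and table_key_domain_map.get(column.split("__", 1)[0], "") == domain
--         ]
--         for domain in ("climate_data", "socio_economics_data", "other_data")
--     }
-- ===== Notes on version B (the rewrite author's own statement) =====
-- stated objective: idiomatic
-- what changed: Replaces the single mutating-dict dispatch loop with a dict comprehension over the three fixed domain names, each mapped to an independent filtered enumerate scan, so no shared mutable state is maintained.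
import Mathlib
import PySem

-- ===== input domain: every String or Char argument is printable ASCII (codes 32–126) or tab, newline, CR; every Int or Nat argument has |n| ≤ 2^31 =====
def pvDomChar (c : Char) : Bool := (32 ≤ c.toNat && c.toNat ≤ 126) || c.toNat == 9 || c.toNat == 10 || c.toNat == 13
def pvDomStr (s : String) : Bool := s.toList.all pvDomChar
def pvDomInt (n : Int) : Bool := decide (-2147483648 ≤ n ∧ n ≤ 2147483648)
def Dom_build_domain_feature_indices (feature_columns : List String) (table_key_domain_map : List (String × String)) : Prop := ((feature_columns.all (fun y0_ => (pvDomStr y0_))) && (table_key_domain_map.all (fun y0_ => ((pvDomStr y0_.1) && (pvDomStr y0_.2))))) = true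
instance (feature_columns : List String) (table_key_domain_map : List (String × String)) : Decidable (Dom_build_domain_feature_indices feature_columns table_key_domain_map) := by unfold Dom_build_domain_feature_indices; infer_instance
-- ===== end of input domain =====

-- B replaces A's single mutating-dict dispatch loop by a map over the three fixed domain names,
-- each paired with an independent filtered scan of enumerate(feature_columns) (idiomatic; same return value).


-- ===== PORT A =====
-- shared primitive-shaped helper: table_key_domain_map.get(column.split("__",1)[0], "")
def bdfiDomain (table_key_domain_map : List (String × String)) (column : String) : String :=
  (PySem.Dict.ofList table_key_domain_map).getD (((PySem.Str.splitMax? column "__" 1).getD []).headD "") ""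

def bdfiStep (table_key_domain_map : List (String × String))
    (d : PySem.Dict String (List Int)) (p : Int × String) : PySem.Dict String (List Int) :=
  if !(PySem.Str.isIn "__" p.2) then d
  else
    let domain := bdfiDomain table_key_domain_map p.2
    if d.contains domain then d.modify domain [] (· ++ [p.1]) else d

def build_domain_feature_indices (feature_columns : List String) (table_key_domain_map : List (String × String)) : List (String × List Int) :=
  let d0 : PySem.Dict String (List Int) :=
    ((PySem.Dict.empty.insert "climate_data" []).insert "socio_economics_data" []).insert "other_data" []
  ((PySem.List.enumerate feature_columns 0).foldl (bdfiStep table_key_domain_map) d0).items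

-- ===== PORT B =====
def build_domain_feature_indices_alt (feature_columns : List String) (table_key_domain_map : List (String × String)) : List (String × List Int) :=
  ["climate_data", "socio_economics_data", "other_data"].map (fun domain =>
    (domain,
      ((PySem.List.enumerate feature_columns 0).filter (fun p =>
        PySem.Str.isIn "__" p.2 && (bdfiDomain table_key_domain_map p.2 == domain))).map Prod.fst))

-- ===== PRECONDITION & SPEC =====
def Spec_build_domain_feature_indices (feature_columns : List String) (table_key_domain_map : List (String × String)) (out : List (String × List Int)) : Prop := out = build_domain_feature_indices_alt feature_columns table_key_domain_map
instance (feature_columns : List String) (table_key_domain_map : List (String × String)) (out : List (String × List Int)) : Decidable (Spec_build_domain_feature_indices feature_columns table_key_domain_map out) := by unfold Spec_build_domain_feature_indices; infer_instance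

-- ===== CLAIM (what is proved, stated in full; the proofs are below) =====
def Claim_equal_build_domain_feature_indices : Prop := ∀ (feature_columns : List String) (table_key_domain_map : List (String × String)), Dom_build_domain_feature_indices feature_columns table_key_domain_map → Spec_build_domain_feature_indices feature_columns table_key_domain_map (build_domain_feature_indices feature_columns table_key_domain_map)

-- ===== LEMMAS AND PROOFS =====


lemma bdfiStep_keys (tkm : List (String × String)) (d : PySem.Dict String (List Int)) (p : Int × String) :
    (bdfiStep tkm d p).keys = d.keys := by
  unfold bdfiStep
  dsimp only
  split_ifs with h1 h2
  · rfl
  · rw [PySem.Dict.keys_modify]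
    rw [PySem.Dict.keys_insert_of_contains (h := h2)]
  · rfl

lemma bdfiStep_contains (tkm : List (String × String)) (d : PySem.Dict String (List Int)) (p : Int × String) (k : String) :
    (bdfiStep tkm d p).contains k = d.contains k := by
  rw [PySem.Dict.contains_eq_decide_mem_keys, PySem.Dict.contains_eq_decide_mem_keys, bdfiStep_keys]

lemma bdfiFold_keys (tkm : List (String × String)) (l : List (Int × String)) (d : PySem.Dict String (List Int)) :
    (l.foldl (bdfiStep tkm) d).keys = d.keys := by
  induction l generalizing d with
  | nil => rfl
  | cons p l ih => rw [List.foldl_cons, ih, bdfiStep_keys]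

lemma bdfiFold_getD (tkm : List (String × String)) (l : List (Int × String)) (d : PySem.Dict String (List Int))
    (k : String) (hk : d.contains k = true) :
    (l.foldl (bdfiStep tkm) d).getD k [] =
      d.getD k [] ++ (l.filter (fun p => PySem.Str.isIn "__" p.2 && (bdfiDomain tkm p.2 == k))).map Prod.fst := by
  induction l generalizing d with
  | nil => simp
  | cons p l ih =>
    rw [List.foldl_cons, ih _ (by rw [bdfiStep_contains]; exact hk), List.filter_cons]
    unfold bdfiStep
    dsimp only
    cases hin : PySem.Str.isIn "__" p.2 with
    | false => simp
    | true =>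
      simp only [Bool.not_true, Bool.false_eq_true, if_false, Bool.true_and]
      by_cases hdom : bdfiDomain tkm p.2 = k
      · rw [hdom, if_pos hk, PySem.Dict.getD_modify_self]
        simp
      · have hbeq : (bdfiDomain tkm p.2 == k) = false := by simp [hdom]
        rw [hbeq]
        simp only [Bool.false_eq_true, if_false]
        split
        · rw [PySem.Dict.getD_modify, if_neg (fun h => hdom h.symm)]
        · rfl

lemma bdfi_d0_keys :
    (((PySem.Dict.empty.insert "climate_data" ([] : List Int)).insert "socio_economics_data" []).insert "other_data" []).keys
      = ["climate_data", "socio_economics_data", "other_data"] := by decide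

theorem build_domain_feature_indices_spec : Claim_equal_build_domain_feature_indices := by
  intro fc tkm _
  unfold Spec_build_domain_feature_indices build_domain_feature_indices build_domain_feature_indices_alt
  set d0 : PySem.Dict String (List Int) :=
    ((PySem.Dict.empty.insert "climate_data" []).insert "socio_economics_data" []).insert "other_data" [] with hd0
  have hkeys : (((PySem.List.enumerate fc 0).foldl (bdfiStep tkm) d0)).keys
      = ["climate_data", "socio_economics_data", "other_data"] := by
    rw [bdfiFold_keys]; exact bdfi_d0_keys
  have hnd : (((PySem.List.enumerate fc 0).foldl (bdfiStep tkm) d0)).keys.Nodup := by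
    rw [hkeys]; decide
  rw [PySem.Dict.items_eq_map_keys _ hnd [], hkeys]
  refine List.map_congr_left ?_
  intro k hkmem
  have hck : d0.contains k = true := by
    fin_cases hkmem <;> decide
  have hgd0 : d0.getD k [] = [] := by
    fin_cases hkmem <;> decide
  rw [bdfiFold_getD tkm _ d0 k hck, hgd0, List.nil_append]
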